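-- pv_equiv track=rewrite | github.com/piao0321/SE | 实验一txt/test1.py | sanguo_table
-- ===== SOURCE A (Python) =====
-- def sanguo_table(words, find_words):
--     """
--     建立三国文章的索引表
--     :param words: 所有词语列表
--     :param find_words: 待查找的词语
--     :return: 返回索引表
--     """
--     table = {}
--     # 暂时定对为曹操和刘备建立索引表
--     for word in find_words:
--         dex = 0  # 循环词语下标
--         temp = []  # 存放查找词语的下标
--         for k in words:
--             if word == k:
--                 temp.append(dex)
--             dex += 1
--         table[word] = temp
--     return table
-- ===== SOURCE B (Python) =====
-- def sanguo_table(words, find_words):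
--     index = {}
--     for i, w in enumerate(words):
--         index.setdefault(w, []).append(i)
--     return {w: index.get(w, []) for w in dict.fromkeys(find_words)}
-- ===== Notes on version B (the rewrite author's own statement) =====
-- stated objective: faster
-- what changed: B makes one indexing pass over words building a word->positions dictionary, then maps the deduplicated query words (dict.fromkeys) to lookups, instead of A's full rescan of words for every query word.
import Mathlib
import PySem

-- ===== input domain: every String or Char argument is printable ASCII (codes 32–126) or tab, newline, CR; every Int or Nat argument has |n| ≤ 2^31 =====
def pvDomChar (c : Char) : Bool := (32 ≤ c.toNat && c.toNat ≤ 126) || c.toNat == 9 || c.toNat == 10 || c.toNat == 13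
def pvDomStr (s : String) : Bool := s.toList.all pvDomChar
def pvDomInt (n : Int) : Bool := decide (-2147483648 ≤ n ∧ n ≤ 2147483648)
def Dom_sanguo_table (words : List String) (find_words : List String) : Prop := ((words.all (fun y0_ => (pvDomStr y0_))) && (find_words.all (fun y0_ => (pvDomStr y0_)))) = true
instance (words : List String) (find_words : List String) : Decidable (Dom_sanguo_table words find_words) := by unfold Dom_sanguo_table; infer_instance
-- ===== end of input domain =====

-- B replaces A's per-query full scan of words with one indexing pass over words plus per-query lookups (faster, asymptotic).
-- ===== PORT A =====
-- inner loop of A: for k in words: if word == k: temp.append(dex); dex += 1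
def sanguoScanA (word : String) (words : List String) : Int × List Int :=
  words.foldl (fun st k => (st.1 + 1, if word == k then st.2 ++ [st.1] else st.2)) (0, [])

def sanguo_table (words : List String) (find_words : List String) : List (String × List Int) :=
  (find_words.foldl (fun t word => t.insert word (sanguoScanA word words).2)
    (PySem.Dict.empty : PySem.Dict String (List Int))).items

-- ===== PORT B =====
-- one pass: for i, w in enumerate(words): index.setdefault(w, []).append(i)
def sanguoIndex (words : List String) : PySem.Dict String (List Int) :=
  (PySem.List.enumerate words).foldl (fun d p => d.modify p.2 [] (· ++ [p.1])) PySem.Dict.empty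

-- {w: index.get(w, []) for w in dict.fromkeys(find_words)} — the keys are distinct and fresh,
-- so the resulting dict's items are exactly this comprehension list, in order
def sanguo_table_alt (words : List String) (find_words : List String) : List (String × List Int) :=
  (PySem.List.dedup find_words).map (fun w => (w, (sanguoIndex words).getD w []))

-- ===== PRECONDITION & SPEC =====
def Spec_sanguo_table (words : List String) (find_words : List String) (out : List (String × List Int)) : Prop := out = sanguo_table_alt words find_words
instance (words : List String) (find_words : List String) (out : List (String × List Int)) : Decidable (Spec_sanguo_table words find_words out) := by unfold Spec_sanguo_table; infer_instance

-- ===== CLAIM (what is proved, stated in full; the proofs are below) =====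
def Claim_equal_sanguo_table : Prop := ∀ (words : List String) (find_words : List String), Dom_sanguo_table words find_words → Spec_sanguo_table words find_words (sanguo_table words find_words)

-- ===== LEMMAS AND PROOFS =====

-- occurrence positions of w in words, counting from s
def sanguoOcc (w : String) : List String → Int → List Int
  | [], _ => []
  | k :: ks, s => (if w == k then [s] else []) ++ sanguoOcc w ks (s + 1)

theorem sanguoScanA_eq (w : String) (words : List String) :
    ∀ (s : Int) (acc : List Int),
      words.foldl (fun st k => (st.1 + 1, if w == k then st.2 ++ [st.1] else st.2)) (s, acc)
        = (s + words.length, acc ++ sanguoOcc w words s) := by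
  induction words with
  | nil => intro s acc; simp [sanguoOcc]
  | cons k ks ih =>
    intro s acc
    simp only [List.foldl_cons, sanguoOcc, List.length_cons, ih]
    by_cases h : w == k <;> simp [h] <;> omega

theorem sanguoIndex_getD (w : String) (words : List String) :
    ∀ (s : Int) (d : PySem.Dict String (List Int)),
      ((PySem.List.enumerate words s).foldl (fun d p => d.modify p.2 [] (· ++ [p.1])) d).getD w []
        = d.getD w [] ++ sanguoOcc w words s := by
  induction words with
  | nil => intro s d; simp [PySem.List.enumerate_nil, sanguoOcc]
  | cons k ks ih =>
    intro s d
    rw [PySem.List.enumerate_cons]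
    simp only [List.foldl_cons, ih, sanguoOcc]
    rw [PySem.Dict.getD_modify]
    by_cases h : w = k <;> simp [h]

theorem sanguo_values_eq (w : String) (words : List String) :
    (sanguoScanA w words).2 = (sanguoIndex words).getD w [] := by
  unfold sanguoScanA sanguoIndex
  rw [sanguoScanA_eq, sanguoIndex_getD]
  simp [PySem.Dict.getD_empty]

-- A's fold inserts a value that depends only on the key: the final lookup is that value for inserted keys
theorem sanguo_foldl_insert_getD (f : String → List Int) (w : String) :
    ∀ (l : List String) (d : PySem.Dict String (List Int)),
      (l.foldl (fun t x => t.insert x (f x)) d).getD w []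
        = if w ∈ l then f w else d.getD w [] := by
  intro l
  induction l with
  | nil => intro d; simp
  | cons k ks ih =>
    intro d
    simp only [List.foldl_cons, ih, PySem.Dict.getD_insert, List.mem_cons]
    by_cases hks : w ∈ ks <;> by_cases hk : w = k <;> simp [hks, hk]

-- ===== VERDICT (by name: the statement is the Claim_ definition above) =====
theorem sanguo_table_spec : Claim_equal_sanguo_table := by
  intro words find_words _
  unfold Spec_sanguo_table sanguo_table sanguo_table_alt
  have hnd : ((find_words.foldl (fun t word => t.insert word (sanguoScanA word words).2)
      (PySem.Dict.empty : PySem.Dict String (List Int))).keys).Nodup := by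
    exact PySem.Dict.nodup_keys_foldl_insert find_words
      (fun t word => (sanguoScanA word words).2) PySem.Dict.empty (by simp)
  rw [PySem.Dict.items_eq_map_keys _ hnd []]
  rw [PySem.Dict.keys_foldl_insert]
  have hkeys : PySem.Set.update (PySem.Dict.empty : PySem.Dict String (List Int)).keys find_words
      = PySem.List.dedup find_words := by
    simp [PySem.Set.update_nil_left]
  rw [hkeys]
  apply List.map_congr_left
  intro w hw
  have hmem : w ∈ find_words := by
    have := (PySem.Set.mem_ofList (xs := find_words) (y := w)).1 (by simpa using hw)
    exact this
  rw [sanguo_foldl_insert_getD, if_pos hmem, sanguo_values_eq]
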